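-- pv_equiv track=rewrite | github.com/manwithacat/dazzle | src/dazzle/docs_update/updater.py | insert_after_header
-- ===== SOURCE A (Python) =====
-- def insert_after_header(content: str, header: str, new_lines_text: str) -> str:
--     """Insert text immediately after a matching header line.
--
--     Useful for adding entries under an existing CHANGELOG section header.
--     """
--     lines = content.split("\n")
--     header_lower = header.lower()
--
--     for i, line in enumerate(lines):
--         if header_lower in line.lower():
--             before = lines[: i + 1]
--             after = lines[i + 1 :]
--             return "\n".join([*before, new_lines_text.rstrip("\n"), *after])
--
--     return content  # Header not found
-- ===== SOURCE B (Python) =====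
-- def insert_after_header(content: str, header: str, new_lines_text: str) -> str:
--     """Insert text immediately after a matching header line (index-based, no line splitting)."""
--     if "\n" in header:
--         return content  # a header containing a newline can never occur inside a single line
--     idx = content.lower().find(header.lower())
--     if idx == -1:
--         return content  # Header not found
--     end = content.find("\n", idx)
--     if end == -1:
--         end = len(content)
--     return content[:end] + "\n" + new_lines_text.rstrip("\n") + content[end:]
-- ===== Notes on version B (the rewrite author's own statement) =====
-- stated objective: alternative
-- what changed: Replaces the split-into-lines/scan/rejoin pipeline with direct string-index arithmetic: one case-insensitive find locates the header, one find locates the end of that line, and the insertion is done by slicing the original string; no line list is ever built.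
import Mathlib
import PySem

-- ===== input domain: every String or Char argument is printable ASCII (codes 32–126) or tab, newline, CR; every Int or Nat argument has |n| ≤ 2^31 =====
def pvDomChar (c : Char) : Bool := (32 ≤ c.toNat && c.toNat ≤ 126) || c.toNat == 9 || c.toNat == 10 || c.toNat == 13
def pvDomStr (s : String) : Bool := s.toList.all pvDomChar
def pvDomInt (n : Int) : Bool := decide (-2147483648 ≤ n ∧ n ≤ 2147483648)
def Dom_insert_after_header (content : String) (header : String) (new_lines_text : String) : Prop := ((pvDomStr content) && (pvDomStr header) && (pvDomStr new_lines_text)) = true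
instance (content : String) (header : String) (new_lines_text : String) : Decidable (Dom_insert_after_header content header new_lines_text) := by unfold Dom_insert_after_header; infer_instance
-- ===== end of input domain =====

-- B replaces A's split-into-lines/scan/rejoin pipeline by direct index arithmetic on the raw
-- string (one case-insensitive find for the header, one find for the end of that line, then
-- slicing); same return value, no line list is built (objective: alternative).

-- shared helper: exact port of Python's  s.rstrip("\n")  (drop trailing '\n' characters)
def pvRstripNL (s : List Char) : List Char := (s.reverse.dropWhile (fun c => c == '\n')).reverse

-- ===== PORT A =====
-- body of A on char lists: split on '\n', scan for the first line whose lowercase form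
-- contains the lowercase header, rejoin with the stripped text inserted after that line
def pvA (c : List Char) (h : List Char) (nl : List Char) : List Char :=
  match (PySem.Chars.splitOn c ['\n']).findIdx?
      (fun line => PySem.Chars.isIn (PySem.Chars.lower h) (PySem.Chars.lower line)) with
  | some i => PySem.Chars.join ['\n'] ((PySem.Chars.splitOn c ['\n']).take (i+1)
      ++ pvRstripNL nl :: (PySem.Chars.splitOn c ['\n']).drop (i+1))
  | none => c

def insert_after_header (content : String) (header : String) (new_lines_text : String) : String :=
  String.ofList (pvA content.toList header.toList new_lines_text.toList)

-- ===== PORT B =====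
-- splice: content[:e2] + "\n" + stripped + content[e2:]
def pvSplice (c : List Char) (e2 : Int) (stripped : List Char) : List Char :=
  PySem.List.slice c none (some e2) ++ '\n' :: (stripped ++ PySem.List.slice c (some e2) none)

-- body of B on char lists: early return if the header contains a newline; otherwise locate the
-- header with one case-insensitive find, find the end of that line (e2), and splice by slicing
def pvB (c : List Char) (h : List Char) (nl : List Char) : List Char :=
  if PySem.Chars.isIn ['\n'] h then c
  else
    if PySem.Chars.find (PySem.Chars.lower c) (PySem.Chars.lower h) = -1 then c
    else
      pvSplice c
        (if PySem.Chars.findFrom c ['\n'] (PySem.Chars.find (PySem.Chars.lower c) (PySem.Chars.lower h)) none = -1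
         then (c.length : Int)
         else PySem.Chars.findFrom c ['\n'] (PySem.Chars.find (PySem.Chars.lower c) (PySem.Chars.lower h)) none)
        (pvRstripNL nl)

def insert_after_header_alt (content : String) (header : String) (new_lines_text : String) : String :=
  String.ofList (pvB content.toList header.toList new_lines_text.toList)

-- ===== PRECONDITION & SPEC =====
def Spec_insert_after_header (content : String) (header : String) (new_lines_text : String) (out : String) : Prop := out = insert_after_header_alt content header new_lines_text
instance (content : String) (header : String) (new_lines_text : String) (out : String) : Decidable (Spec_insert_after_header content header new_lines_text out) := by unfold Spec_insert_after_header; infer_instance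

-- ===== CLAIM (what is proved, stated in full; the proofs are below) =====
def Claim_equal_insert_after_header : Prop := ∀ (content : String) (header : String) (new_lines_text : String), Dom_insert_after_header content header new_lines_text → Spec_insert_after_header content header new_lines_text (insert_after_header content header new_lines_text)

-- ===== LEMMAS AND PROOFS =====

-- ---- characters: lowering and the newline ----
theorem pv_lowerChar_nl : PySem.Chars.lowerChar '\n' = '\n' := by decide

theorem pv_lowerChar_eq_nl {a : Char} (h : PySem.Chars.lowerChar a = '\n') : a = '\n' := by
  unfold PySem.Chars.lowerChar PySem.Chars.isupper at h
  split_ifs at h with hu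
  · exfalso
    simp only [Bool.and_eq_true, decide_eq_true_eq] at hu
    obtain ⟨h1, h2⟩ := hu
    have hA : 65 ≤ a.toNat := h1
    have hZ : a.toNat ≤ 90 := h2
    have hv : (Char.ofNat (a.toNat + 32)).toNat = a.toNat + 32 := by
      rw [Char.toNat_ofNat, if_pos (Or.inl (by omega))]
    rw [h] at hv
    have : ('\n' : Char).toNat = 10 := rfl
    omega
  · exact h

theorem pv_mem_lower {s : List Char} : '\n' ∈ PySem.Chars.lower s ↔ '\n' ∈ s := by
  unfold PySem.Chars.lower
  constructor
  · intro h
    obtain ⟨a, ha, hea⟩ := List.mem_map.1 h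
    exact (pv_lowerChar_eq_nl hea) ▸ ha
  · intro h
    exact List.mem_map.2 ⟨'\n', h, pv_lowerChar_nl⟩

theorem pv_lower_append (a b : List Char) :
    PySem.Chars.lower (a ++ b) = PySem.Chars.lower a ++ PySem.Chars.lower b := by
  simp [PySem.Chars.lower]

theorem pv_lower_nl_cons (r : List Char) :
    PySem.Chars.lower ('\n' :: r) = '\n' :: PySem.Chars.lower r := by
  simp [PySem.Chars.lower, pv_lowerChar_nl]

theorem pv_length_lower (s : List Char) : (PySem.Chars.lower s).length = s.length := by
  simp [PySem.Chars.lower]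

-- ---- splitOn '\n' : structural characterisation ----
theorem pv_go_nil (f : Nat) (cur : List Char) (acc : List (List Char)) :
    PySem.Chars.splitOn.go ['\n'] (f+1) [] cur acc = acc.reverse ++ [cur.reverse] := by
  rw [PySem.Chars.splitOn.go] <;> simp

theorem pv_go_newline (f : Nat) (rest cur : List Char) (acc : List (List Char)) :
    PySem.Chars.splitOn.go ['\n'] (f+1) ('\n' :: rest) cur acc
      = PySem.Chars.splitOn.go ['\n'] f rest [] (cur.reverse :: acc) := by
  rw [PySem.Chars.splitOn.go]
  simp [List.isPrefixOf]

theorem pv_go_cons (f : Nat) {c : Char} (rest cur : List Char) (acc : List (List Char)) (hc : c ≠ '\n') :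
    PySem.Chars.splitOn.go ['\n'] (f+1) (c :: rest) cur acc
      = PySem.Chars.splitOn.go ['\n'] f rest (c :: cur) acc := by
  rw [PySem.Chars.splitOn.go]
  simp [List.isPrefixOf, Ne.symm hc]

theorem pv_go_acc : ∀ (fuel : Nat) (s cur : List Char) (acc : List (List Char)), s.length < fuel →
    PySem.Chars.splitOn.go ['\n'] fuel s cur acc
      = acc.reverse ++ PySem.Chars.splitOn.go ['\n'] fuel s cur [] := by
  intro fuel
  induction fuel with
  | zero => intro s cur acc h; omega
  | succ f ih =>
    intro s cur acc h
    cases s with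
    | nil => rw [pv_go_nil, pv_go_nil]; simp
    | cons c rest =>
      have hr : rest.length < f := by simpa using h
      by_cases hc : c = '\n'
      · subst hc
        rw [pv_go_newline, pv_go_newline, ih _ _ (cur.reverse :: acc) hr, ih _ _ [cur.reverse] hr]
        simp
      · rw [pv_go_cons f rest cur acc hc, pv_go_cons f rest cur [] hc, ih _ _ acc hr]

theorem pv_go_nonl : ∀ (fuel : Nat) (s cur : List Char) (acc : List (List Char)), '\n' ∉ s → s.length < fuel →
    PySem.Chars.splitOn.go ['\n'] fuel s cur acc = acc.reverse ++ [cur.reverse ++ s] := by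
  intro fuel
  induction fuel with
  | zero => intro s cur acc _ h; omega
  | succ f ih =>
    intro s cur acc hs h
    cases s with
    | nil => rw [pv_go_nil]; simp
    | cons c rest =>
      have hc : c ≠ '\n' := fun hc => hs (hc ▸ List.mem_cons_self)
      rw [pv_go_cons f rest cur acc hc,
        ih rest (c :: cur) acc (fun hm => hs (List.mem_cons_of_mem _ hm)) (by simpa using h)]
      simp

theorem pv_go_walk : ∀ (l : List Char) (fuel : Nat) (r cur : List Char) (acc : List (List Char)),
    '\n' ∉ l → (l ++ '\n' :: r).length < fuel →
    PySem.Chars.splitOn.go ['\n'] fuel (l ++ '\n' :: r) cur acc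
      = PySem.Chars.splitOn.go ['\n'] (fuel - (l.length + 1)) r [] ((cur.reverse ++ l) :: acc) := by
  intro l
  induction l with
  | nil =>
    intro fuel r cur acc _ h
    cases fuel with
    | zero => simp at h
    | succ f =>
      simp only [List.nil_append]
      rw [pv_go_newline]
      simp
  | cons a l ih =>
    intro fuel r cur acc hnl h
    have ha : a ≠ '\n' := fun hc => hnl (hc ▸ List.mem_cons_self)
    cases fuel with
    | zero => simp at h
    | succ f =>
      simp only [List.cons_append]
      rw [pv_go_cons f _ cur acc ha]
      have hlen : (l ++ '\n' :: r).length < f := by simp at h ⊢; omega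
      rw [ih f r (a :: cur) acc (fun hm => hnl (List.mem_cons_of_mem _ hm)) hlen]
      have harith : f - (l.length + 1) = f + 1 - ((a :: l).length + 1) := by
        simp only [List.length_cons]; omega
      rw [← harith]
      simp

theorem pv_splitOn_nonl {c : List Char} (h : '\n' ∉ c) :
    PySem.Chars.splitOn c ['\n'] = [c] := by
  unfold PySem.Chars.splitOn
  rw [pv_go_nonl (c.length + 1) c [] [] h (by omega)]
  simp

theorem pv_splitOn_cons {l r : List Char} (h : '\n' ∉ l) :
    PySem.Chars.splitOn (l ++ '\n' :: r) ['\n'] = l :: PySem.Chars.splitOn r ['\n'] := by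
  unfold PySem.Chars.splitOn
  rw [pv_go_walk l ((l ++ '\n' :: r).length + 1) r [] [] h (by omega)]
  have harith : (l ++ '\n' :: r).length + 1 - (l.length + 1) = r.length + 1 := by
    simp only [List.length_append, List.length_cons]; omega
  rw [harith]
  rw [pv_go_acc (r.length + 1) r [] [([].reverse ++ l)] (by omega)]
  simp

theorem pv_dec (c : List Char) : '\n' ∉ c ∨ ∃ l r, c = l ++ '\n' :: r ∧ '\n' ∉ l := by
  induction c with
  | nil => exact Or.inl (by simp)
  | cons a c ih =>
    by_cases ha : a = '\n'
    · exact Or.inr ⟨[], c, by simp [ha], by simp⟩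
    · rcases ih with h | ⟨l, r, rfl, hl⟩
      · exact Or.inl (by simp [h, Ne.symm ha])
      · exact Or.inr ⟨a :: l, r, by simp, by simp [hl, Ne.symm ha]⟩

theorem pv_splitOn_ne_nil (c : List Char) : PySem.Chars.splitOn c ['\n'] ≠ [] := by
  rcases pv_dec c with h | ⟨l, r, rfl, hl⟩
  · rw [pv_splitOn_nonl h]; simp
  · rw [pv_splitOn_cons hl]; simp

theorem pv_join_cons (a : List Char) {X : List (List Char)} (hX : X ≠ []) :
    PySem.Chars.join ['\n'] (a :: X) = a ++ '\n' :: PySem.Chars.join ['\n'] X := by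
  cases X with
  | nil => exact absurd rfl hX
  | cons b Y => rw [PySem.Chars.join_cons_cons]; simp

theorem pv_join_splitOn : ∀ (n : Nat) (c : List Char), c.length ≤ n →
    PySem.Chars.join ['\n'] (PySem.Chars.splitOn c ['\n']) = c := by
  intro n
  induction n with
  | zero =>
    intro c h
    have : c = [] := List.length_eq_zero_iff.1 (by omega)
    subst this
    rw [pv_splitOn_nonl (by simp), PySem.Chars.join_singleton]
  | succ n ih =>
    intro c h
    rcases pv_dec c with hc | ⟨l, r, rfl, hl⟩
    · rw [pv_splitOn_nonl hc, PySem.Chars.join_singleton]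
    · rw [pv_splitOn_cons hl, pv_join_cons l (pv_splitOn_ne_nil r),
        ih r (by simp at h; omega)]

theorem pv_mem_splitOn : ∀ (n : Nat) (c : List Char), c.length ≤ n →
    ∀ line ∈ PySem.Chars.splitOn c ['\n'], '\n' ∉ line := by
  intro n
  induction n with
  | zero =>
    intro c h line hm
    have : c = [] := List.length_eq_zero_iff.1 (by omega)
    subst this
    rw [pv_splitOn_nonl (by simp)] at hm
    simp at hm
    simp [hm]
  | succ n ih =>
    intro c h line hm
    rcases pv_dec c with hc | ⟨l, r, rfl, hl⟩
    · rw [pv_splitOn_nonl hc] at hm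
      simp at hm
      simpa [hm] using hc
    · rw [pv_splitOn_cons hl] at hm
      rcases List.mem_cons.1 hm with rfl | hm'
      · exact hl
      · exact ih r (by simp at h; omega) line hm'

-- ---- find: uniqueness and positional lemmas ----
theorem pv_find_eq {s sub : List Char} {n : Nat} (h1 : sub <+: s.drop n)
    (h2 : ∀ i, i < n → ¬ sub <+: s.drop i) : PySem.Chars.find s sub = (n : Int) := by
  have hin : PySem.Chars.isIn sub s = true :=
    (PySem.Chars.exists_prefix_drop_iff_isIn sub s).1 ⟨n, h1⟩
  have h0 : 0 ≤ PySem.Chars.find s sub :=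
    (PySem.Chars.find_nonneg_iff s sub).2 ((PySem.Chars.isIn_iff_infix sub s).1 hin)
  obtain ⟨hp, hmin⟩ := PySem.Chars.find_spec h0
  rcases lt_trichotomy (PySem.Chars.find s sub).toNat n with hlt | heq | hgt
  · exact absurd hp (h2 _ hlt)
  · rw [← heq, Int.toNat_of_nonneg h0]
  · exact absurd h1 (hmin n hgt)

theorem pv_prefix_left {hl a b : List Char} {i : Nat} (h : hl <+: (a ++ b).drop i)
    (hi : i + hl.length ≤ a.length) : hl <+: a.drop i := by
  rw [List.prefix_iff_eq_take] at h ⊢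
  rw [List.drop_append_of_le_length (by omega)] at h
  rwa [List.take_append_of_le_length (by simp; omega)] at h

theorem pv_prefix_ext {hl a : List Char} (b : List Char) {i : Nat} (h : hl <+: a.drop i)
    (hi : i ≤ a.length) : hl <+: (a ++ b).drop i := by
  rw [List.drop_append_of_le_length hi]
  exact h.trans (List.prefix_append _ _)

theorem pv_cross {hl a b : List Char} {i : Nat} (h : hl <+: (a ++ '\n' :: b).drop i)
    (h1 : i ≤ a.length) (h2 : a.length < i + hl.length) : '\n' ∈ hl := by
  have hidx : a.length - i < hl.length := by omega
  have hgl : hl[a.length - i] = ((a ++ '\n' :: b).drop i)[a.length - i]'(by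
      have := h.length_le; omega) := h.getElem hidx
  rw [List.getElem_drop] at hgl
  have hi' : i + (a.length - i) = a.length := by omega
  have hnl : (a ++ '\n' :: b)[i + (a.length - i)]'(by simp; omega) = '\n' := by
    simp only [hi']
    rw [List.getElem_append_right (by omega)]
    simp
  rw [hnl] at hgl
  rw [← hgl]
  exact List.getElem_mem _

theorem pv_find_nl_nonl {s : List Char} (h : '\n' ∉ s) :
    PySem.Chars.find s ['\n'] = -1 := by
  rw [PySem.Chars.find_eq_neg_one_iff]
  intro hin
  exact h (hin.sublist.subset (by simp))

theorem pv_find_nl {a : List Char} (b : List Char) (h : '\n' ∉ a) :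
    PySem.Chars.find (a ++ '\n' :: b) ['\n'] = (a.length : Int) := by
  apply pv_find_eq
  · rw [List.drop_append_of_le_length (le_refl _)]
    simp
  · intro i hi hpre
    have hp : ('\n' : Char) ∈ a.drop i := by
      have := pv_prefix_left hpre (by simp; omega)
      exact this.sublist.subset (by simp)
    exact h ((List.drop_sublist _ _).subset hp)

-- drop beyond the first line of  a ++ '\n' :: b
theorem pv_drop_past {a b : List Char} {i : Nat} (h : a.length + 1 ≤ i) :
    (a ++ '\n' :: b).drop i = b.drop (i - (a.length + 1)) := by
  have : a ++ '\n' :: b = (a ++ ['\n']) ++ b := by simp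
  rw [this, List.drop_append]
  have hlen : (a ++ ['\n']).length = a.length + 1 := by simp
  rw [List.drop_eq_nil_of_le (by omega), hlen]
  simp

-- case "header found in the first line": find on the whole string is find in the first line
theorem pv_findT {l r hl : List Char} (hT : PySem.Chars.isIn hl (PySem.Chars.lower l) = true) :
    PySem.Chars.find (PySem.Chars.lower l ++ '\n' :: PySem.Chars.lower r) hl
        = PySem.Chars.find (PySem.Chars.lower l) hl ∧
      (PySem.Chars.find (PySem.Chars.lower l) hl).toNat + hl.length ≤ l.length := by
  have h0 : 0 ≤ PySem.Chars.find (PySem.Chars.lower l) hl :=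
    (PySem.Chars.find_nonneg_iff _ _).2 ((PySem.Chars.isIn_iff_infix _ _).1 hT)
  obtain ⟨hp, hmin⟩ := PySem.Chars.find_spec h0
  set k0 := (PySem.Chars.find (PySem.Chars.lower l) hl).toNat with hk0
  have hfle : PySem.Chars.find (PySem.Chars.lower l) hl ≤ (l.length : Int) := by
    have := PySem.Chars.find_le_length (PySem.Chars.lower l) hl
    rwa [pv_length_lower] at this
  have hk0le : k0 ≤ l.length := by omega
  have hbound : k0 + hl.length ≤ l.length := by
    have h1 : hl.length ≤ ((PySem.Chars.lower l).drop k0).length := hp.length_le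
    rw [List.length_drop, pv_length_lower] at h1
    omega
  have hk0le' : k0 ≤ l.length := hk0le
  refine ⟨?_, hbound⟩
  have heq : PySem.Chars.find (PySem.Chars.lower l ++ '\n' :: PySem.Chars.lower r) hl = (k0 : Int) := by
    apply pv_find_eq
    · exact pv_prefix_ext _ hp (by rw [pv_length_lower]; omega)
    · intro i hi hpre
      have : hl <+: (PySem.Chars.lower l).drop i :=
        pv_prefix_left hpre (by rw [pv_length_lower]; omega)
      exact hmin i hi this
  rw [heq, hk0, Int.toNat_of_nonneg h0]

-- case "header not in the first line": find on the whole string shifts a find in the rest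
theorem pv_findF {l r hl : List Char} (hnl : '\n' ∉ hl)
    (hF : PySem.Chars.isIn hl (PySem.Chars.lower l) = false) :
    PySem.Chars.find (PySem.Chars.lower l ++ '\n' :: PySem.Chars.lower r) hl
      = if PySem.Chars.find (PySem.Chars.lower r) hl = -1 then -1
        else (l.length : Int) + 1 + PySem.Chars.find (PySem.Chars.lower r) hl := by
  have hne : hl ≠ [] := by
    intro h; rw [h, PySem.Chars.isIn_nil] at hF; simp at hF
  have hlow : ∀ i : Nat, i ≤ l.length →
      ¬ hl <+: (PySem.Chars.lower l ++ '\n' :: PySem.Chars.lower r).drop i := by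
    intro i hi hpre
    by_cases hcase : i + hl.length ≤ l.length
    · have : hl <+: (PySem.Chars.lower l).drop i :=
        pv_prefix_left hpre (by rw [pv_length_lower]; omega)
      have : PySem.Chars.isIn hl (PySem.Chars.lower l) = true :=
        (PySem.Chars.exists_prefix_drop_iff_isIn _ _).1 ⟨i, this⟩
      rw [hF] at this; simp at this
    · exact hnl (pv_cross hpre (by rw [pv_length_lower]; omega) (by rw [pv_length_lower]; omega))
  split_ifs with hnone
  · rw [PySem.Chars.find_eq_neg_one_iff]
    intro hin
    obtain ⟨j, hj⟩ := (PySem.Chars.exists_prefix_drop_iff_isIn hl _).2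
      ((PySem.Chars.isIn_iff_infix hl _).2 hin)
    by_cases hjl : j ≤ l.length
    · exact hlow j hjl hj
    · have hj' : hl <+: (PySem.Chars.lower r).drop (j - (l.length + 1)) := by
        rw [pv_drop_past (by rw [pv_length_lower]; omega)] at hj
        rwa [pv_length_lower] at hj
      have : PySem.Chars.isIn hl (PySem.Chars.lower r) = true :=
        (PySem.Chars.exists_prefix_drop_iff_isIn _ _).1 ⟨_, hj'⟩
      rw [PySem.Chars.find_eq_neg_one_iff] at hnone
      exact hnone ((PySem.Chars.isIn_iff_infix _ _).1 this)
  · have h0 : 0 ≤ PySem.Chars.find (PySem.Chars.lower r) hl := by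
      have := PySem.Chars.neg_one_le_find (PySem.Chars.lower r) hl
      omega
    obtain ⟨hp, hmin⟩ := PySem.Chars.find_spec h0
    set k' := (PySem.Chars.find (PySem.Chars.lower r) hl).toNat with hk'
    have heq : PySem.Chars.find (PySem.Chars.lower l ++ '\n' :: PySem.Chars.lower r) hl
        = ((l.length + 1 + k' : Nat) : Int) := by
      apply pv_find_eq
      · rw [pv_drop_past (by rw [pv_length_lower]; omega), pv_length_lower]
        simpa using hp
      · intro i hi hpre
        by_cases hil : i ≤ l.length
        · exact hlow i hil hpre
        · rw [pv_drop_past (by rw [pv_length_lower]; omega), pv_length_lower] at hpre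
          exact hmin _ (by omega) hpre
    have hc2 : PySem.Chars.find (PySem.Chars.lower r) hl = (k' : Int) :=
      (Int.toNat_of_nonneg h0).symm
    rw [heq, hc2]
    omega

-- ---- step lemmas for the two programs ----
theorem pv_isIn_nl_false {h : List Char} (hh : '\n' ∉ h) : PySem.Chars.isIn ['\n'] h = false := by
  rw [PySem.Chars.isIn_eq_false_iff]
  intro hin
  exact hh (hin.sublist.subset (by simp))

theorem pv_mem_lower_header {h : List Char} (hh : '\n' ∉ h) : '\n' ∉ PySem.Chars.lower h :=
  fun hm => hh (pv_mem_lower.1 hm)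

theorem pv_A_nonl {c h nl : List Char} (hc : '\n' ∉ c) :
    pvA c h nl = if PySem.Chars.isIn (PySem.Chars.lower h) (PySem.Chars.lower c) then
        c ++ '\n' :: (pvRstripNL nl) else c := by
  unfold pvA
  rw [pv_splitOn_nonl hc]
  rw [List.findIdx?_cons]
  split_ifs with hT
  · simp [PySem.Chars.join_cons_cons, PySem.Chars.join_singleton]
  · simp [List.findIdx?_nil]

theorem pv_B_nonl {c h nl : List Char} (hh : '\n' ∉ h) (hc : '\n' ∉ c) :
    pvB c h nl = if PySem.Chars.isIn (PySem.Chars.lower h) (PySem.Chars.lower c) then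
        c ++ '\n' :: (pvRstripNL nl) else c := by
  unfold pvB
  rw [if_neg (by simp [pv_isIn_nl_false hh])]
  by_cases hT : PySem.Chars.isIn (PySem.Chars.lower h) (PySem.Chars.lower c) = true
  · have h0 : 0 ≤ PySem.Chars.find (PySem.Chars.lower c) (PySem.Chars.lower h) :=
      (PySem.Chars.find_nonneg_iff _ _).2 ((PySem.Chars.isIn_iff_infix _ _).1 hT)
    rw [if_neg (by omega), if_pos hT]
    have hkc : PySem.Chars.find (PySem.Chars.lower c) (PySem.Chars.lower h)
        = (((PySem.Chars.find (PySem.Chars.lower c) (PySem.Chars.lower h)).toNat : Nat) : Int) :=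
      (Int.toNat_of_nonneg h0).symm
    have hkle : (PySem.Chars.find (PySem.Chars.lower c) (PySem.Chars.lower h)).toNat ≤ c.length := by
      have := PySem.Chars.find_le_length (PySem.Chars.lower c) (PySem.Chars.lower h)
      rw [pv_length_lower] at this
      omega
    rw [hkc, PySem.Chars.findFrom_natCast c ['\n'] _ hkle]
    have hdrop : PySem.Chars.find (c.drop (PySem.Chars.find (PySem.Chars.lower c) (PySem.Chars.lower h)).toNat) ['\n'] = -1 :=
      pv_find_nl_nonl (fun hm => hc ((List.drop_sublist _ _).subset hm))
    rw [if_pos hdrop]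
    unfold pvSplice
    rw [if_pos rfl]
    rw [PySem.List.slice_to c (by positivity), PySem.List.slice_from c (by positivity)]
    simp
  · have hfind : PySem.Chars.find (PySem.Chars.lower c) (PySem.Chars.lower h) = -1 := by
      rw [PySem.Chars.find_eq_neg_one_iff]
      intro hin
      exact hT ((PySem.Chars.isIn_iff_infix _ _).2 hin)
    rw [if_pos hfind, if_neg hT]

theorem pv_A_T {l r h nl : List Char} (hl : '\n' ∉ l)
    (hT : PySem.Chars.isIn (PySem.Chars.lower h) (PySem.Chars.lower l) = true) :
    pvA (l ++ '\n' :: r) h nl = l ++ '\n' :: (pvRstripNL nl ++ '\n' :: r) := by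
  unfold pvA
  rw [pv_splitOn_cons hl, List.findIdx?_cons, if_pos hT]
  simp only [List.take_succ_cons, List.take_zero, List.drop_succ_cons, List.drop_zero]
  rw [show ([l] ++ pvRstripNL nl :: PySem.Chars.splitOn r ['\n'])
      = l :: pvRstripNL nl :: PySem.Chars.splitOn r ['\n'] by simp]
  rw [PySem.Chars.join_cons_cons, pv_join_cons _ (pv_splitOn_ne_nil r),
    pv_join_splitOn r.length r (le_refl _)]
  simp

theorem pv_A_F {l r h nl : List Char} (hl : '\n' ∉ l)
    (hF : PySem.Chars.isIn (PySem.Chars.lower h) (PySem.Chars.lower l) = false) :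
    pvA (l ++ '\n' :: r) h nl = l ++ '\n' :: pvA r h nl := by
  unfold pvA
  rw [pv_splitOn_cons hl, List.findIdx?_cons, if_neg (by simp [hF])]
  cases hidx : (PySem.Chars.splitOn r ['\n']).findIdx?
      (fun line => PySem.Chars.isIn (PySem.Chars.lower h) (PySem.Chars.lower line)) with
  | none => simp
  | some i =>
    simp only [Option.map_some]
    rw [List.take_succ_cons, List.drop_succ_cons]
    rw [show (l :: (PySem.Chars.splitOn r ['\n']).take (i+1))
        ++ pvRstripNL nl :: (PySem.Chars.splitOn r ['\n']).drop (i+1)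
      = l :: ((PySem.Chars.splitOn r ['\n']).take (i+1)
        ++ pvRstripNL nl :: (PySem.Chars.splitOn r ['\n']).drop (i+1)) by simp]
    rw [pv_join_cons _ (by simp)]

theorem pv_B_T {l r h nl : List Char} (hh : '\n' ∉ h) (hl : '\n' ∉ l)
    (hT : PySem.Chars.isIn (PySem.Chars.lower h) (PySem.Chars.lower l) = true) :
    pvB (l ++ '\n' :: r) h nl = l ++ '\n' :: (pvRstripNL nl ++ '\n' :: r) := by
  have h0 : 0 ≤ PySem.Chars.find (PySem.Chars.lower l) (PySem.Chars.lower h) :=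
    (PySem.Chars.find_nonneg_iff _ _).2 ((PySem.Chars.isIn_iff_infix _ _).1 hT)
  obtain ⟨hfind, hbound⟩ := pv_findT (hl := PySem.Chars.lower h) (r := r) hT
  set k0 := (PySem.Chars.find (PySem.Chars.lower l) (PySem.Chars.lower h)).toNat with hk0
  have hkc : PySem.Chars.find (PySem.Chars.lower l) (PySem.Chars.lower h) = (k0 : Int) :=
    (Int.toNat_of_nonneg h0).symm
  have hk0le : k0 ≤ l.length := by omega
  have hklen : k0 ≤ (l ++ '\n' :: r).length := by simp; omega
  have hbig : PySem.Chars.find (PySem.Chars.lower (l ++ '\n' :: r)) (PySem.Chars.lower h)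
      = (k0 : Int) := by
    rw [pv_lower_append, pv_lower_nl_cons, hfind, hkc]
  have hdropc : (l ++ '\n' :: r).drop k0 = l.drop k0 ++ '\n' :: r :=
    List.drop_append_of_le_length hk0le
  have hFF : PySem.Chars.findFrom (l ++ '\n' :: r) ['\n'] ((k0 : Nat) : Int) none
      = (l.length : Int) := by
    rw [PySem.Chars.findFrom_natCast _ ['\n'] k0 hklen, hdropc,
      pv_find_nl r (fun hm => hl ((List.drop_sublist _ _).subset hm))]
    rw [if_neg (by omega)]
    simp only [List.length_drop]
    omega
  unfold pvB
  rw [if_neg (by simp [pv_isIn_nl_false hh]), hbig]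
  rw [if_neg (by omega), hFF]
  rw [if_neg (by omega)]
  unfold pvSplice
  rw [PySem.List.slice_to _ (by positivity), PySem.List.slice_from _ (by positivity)]
  rw [show ((l.length : Int)).toNat = l.length by omega]
  rw [List.take_left, List.drop_left]

theorem pv_B_F {l r h nl : List Char} (hh : '\n' ∉ h)
    (hF : PySem.Chars.isIn (PySem.Chars.lower h) (PySem.Chars.lower l) = false) :
    pvB (l ++ '\n' :: r) h nl = l ++ '\n' :: pvB r h nl := by
  have g1 : ¬ PySem.Chars.isIn ['\n'] h = true := by simp [pv_isIn_nl_false hh]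
  have hshift := pv_findF (r := r) (pv_mem_lower_header hh) hF
  by_cases hm1 : PySem.Chars.find (PySem.Chars.lower r) (PySem.Chars.lower h) = -1
  · have hbig : PySem.Chars.find (PySem.Chars.lower (l ++ '\n' :: r)) (PySem.Chars.lower h) = -1 := by
      rw [pv_lower_append, pv_lower_nl_cons, hshift, if_pos hm1]
    have hL : pvB (l ++ '\n' :: r) h nl = l ++ '\n' :: r := by
      unfold pvB
      rw [if_neg g1, hbig, if_pos rfl]
    have hR : pvB r h nl = r := by
      unfold pvB
      rw [if_neg g1, hm1, if_pos rfl]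
    rw [hL, hR]
  · have h0 : 0 ≤ PySem.Chars.find (PySem.Chars.lower r) (PySem.Chars.lower h) := by
      have := PySem.Chars.neg_one_le_find (PySem.Chars.lower r) (PySem.Chars.lower h)
      omega
    set k' := (PySem.Chars.find (PySem.Chars.lower r) (PySem.Chars.lower h)).toNat with hk'
    have hkc : PySem.Chars.find (PySem.Chars.lower r) (PySem.Chars.lower h) = (k' : Int) :=
      (Int.toNat_of_nonneg h0).symm
    have hkr : k' ≤ r.length := by
      have := PySem.Chars.find_le_length (PySem.Chars.lower r) (PySem.Chars.lower h)
      rw [pv_length_lower] at this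
      omega
    have hbig : PySem.Chars.find (PySem.Chars.lower (l ++ '\n' :: r)) (PySem.Chars.lower h)
        = ((l.length + 1 + k' : Nat) : Int) := by
      rw [pv_lower_append, pv_lower_nl_cons, hshift, if_neg hm1, hkc]
      push_cast
      ring
    have hdropc : (l ++ '\n' :: r).drop (l.length + 1 + k') = r.drop k' := by
      rw [pv_drop_past (by omega)]
      congr 1
      omega
    have hFFbig : PySem.Chars.findFrom (l ++ '\n' :: r) ['\n'] ((l.length + 1 + k' : Nat) : Int) none
        = if PySem.Chars.find (r.drop k') ['\n'] = -1 then (-1 : Int)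
          else ((l.length + 1 + k' : Nat) : Int) + PySem.Chars.find (r.drop k') ['\n'] := by
      rw [PySem.Chars.findFrom_natCast _ ['\n'] (l.length + 1 + k') (by simp; omega), hdropc]
    have hFFr : PySem.Chars.findFrom r ['\n'] ((k' : Nat) : Int) none
        = if PySem.Chars.find (r.drop k') ['\n'] = -1 then (-1 : Int)
          else (k' : Int) + PySem.Chars.find (r.drop k') ['\n'] :=
      PySem.Chars.findFrom_natCast r ['\n'] k' hkr
    by_cases hm2 : PySem.Chars.find (r.drop k') ['\n'] = -1
    · have gbig : ¬(((l.length + 1 + k' : Nat) : Int) = -1) := by omega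
      have gk : ¬(((k' : Nat) : Int) = -1) := by omega
      have hL : pvB (l ++ '\n' :: r) h nl
          = pvSplice (l ++ '\n' :: r) (((l ++ '\n' :: r).length : Int)) (pvRstripNL nl) := by
        unfold pvB
        rw [if_neg g1, hbig, if_neg gbig, hFFbig, if_pos hm2, if_pos rfl]
      have hR : pvB r h nl = pvSplice r ((r.length : Int)) (pvRstripNL nl) := by
        unfold pvB
        rw [if_neg g1, hkc, if_neg gk, hFFr, if_pos hm2, if_pos rfl]
      rw [hL, hR]
      unfold pvSplice
      rw [PySem.List.slice_to _ (by positivity), PySem.List.slice_from _ (by positivity),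
        PySem.List.slice_to _ (by positivity), PySem.List.slice_from _ (by positivity)]
      rw [show (((l ++ '\n' :: r).length : Int)).toNat = (l ++ '\n' :: r).length by omega,
        show ((r.length : Int)).toNat = r.length by omega]
      rw [List.take_length, List.drop_length, List.take_length, List.drop_length]
      simp
    · have h02 : 0 ≤ PySem.Chars.find (r.drop k') ['\n'] := by
        have := PySem.Chars.neg_one_le_find (r.drop k') ['\n']
        omega
      set m := (PySem.Chars.find (r.drop k') ['\n']).toNat with hm
      have hmc : PySem.Chars.find (r.drop k') ['\n'] = (m : Int) := (Int.toNat_of_nonneg h02).symm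
      have hmr : m ≤ r.length - k' := by
        have := PySem.Chars.find_le_length (r.drop k') ['\n']
        rw [List.length_drop] at this
        omega
      have gbig : ¬(((l.length + 1 + k' : Nat) : Int) = -1) := by omega
      have gk : ¬(((k' : Nat) : Int) = -1) := by omega
      have gLm : ¬(((l.length + 1 + k' : Nat) : Int) + (m : Int) = -1) := by omega
      have grm : ¬(((k' : Nat) : Int) + (m : Int) = -1) := by omega
      have hL : pvB (l ++ '\n' :: r) h nl
          = pvSplice (l ++ '\n' :: r) (((l.length + 1 + k' : Nat) : Int) + (m : Int)) (pvRstripNL nl) := by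
        unfold pvB
        rw [if_neg g1, hbig, if_neg gbig, hFFbig, if_neg hm2, hmc, if_neg gLm]
      have hR : pvB r h nl = pvSplice r (((k' : Nat) : Int) + (m : Int)) (pvRstripNL nl) := by
        unfold pvB
        rw [if_neg g1, hkc, if_neg gk, hFFr, if_neg hm2, hmc, if_neg grm]
      rw [hL, hR]
      unfold pvSplice
      rw [PySem.List.slice_to _ (by positivity), PySem.List.slice_from _ (by positivity),
        PySem.List.slice_to _ (by positivity), PySem.List.slice_from _ (by positivity)]
      rw [show ((((l.length + 1 + k' : Nat) : Int) + (m : Int))).toNat = l.length + 1 + (k' + m) by omega,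
        show ((((k' : Nat) : Int) + (m : Int))).toNat = k' + m by omega]
      rw [List.take_append, List.drop_append]
      rw [List.take_of_length_le (by omega), List.drop_eq_nil_of_le (by omega)]
      have h1 : l.length + 1 + (k' + m) - l.length = (k' + m) + 1 := by omega
      rw [h1]
      simp

-- ---- main equivalence ----
theorem pv_main_nonl (h nl : List Char) (hh : '\n' ∉ h) :
    ∀ (n : Nat) (c : List Char), c.length ≤ n → pvA c h nl = pvB c h nl := by
  intro n
  induction n with
  | zero =>
    intro c hlen
    have : c = [] := List.length_eq_zero_iff.1 (by omega)
    subst this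
    rw [pv_A_nonl (by simp), pv_B_nonl hh (by simp)]
  | succ n ih =>
    intro c hlen
    rcases pv_dec c with hc | ⟨l, r, rfl, hl⟩
    · rw [pv_A_nonl hc, pv_B_nonl hh hc]
    · cases hT : PySem.Chars.isIn (PySem.Chars.lower h) (PySem.Chars.lower l) with
      | true => rw [pv_A_T hl hT, pv_B_T hh hl hT]
      | false =>
        rw [pv_A_F hl hT, pv_B_F hh hT, ih r (by simp at hlen; omega)]

theorem pv_A_nlheader {c h nl : List Char} (hh : '\n' ∈ h) : pvA c h nl = c := by
  unfold pvA
  have : (PySem.Chars.splitOn c ['\n']).findIdx?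
      (fun line => PySem.Chars.isIn (PySem.Chars.lower h) (PySem.Chars.lower line)) = none := by
    rw [List.findIdx?_eq_none_iff]
    intro line hm
    rw [PySem.Chars.isIn_eq_false_iff]
    intro hin
    have h1 : '\n' ∈ PySem.Chars.lower h := pv_mem_lower.2 hh
    have h2 : '\n' ∈ line := pv_mem_lower.1 (hin.sublist.subset h1)
    exact pv_mem_splitOn c.length c (le_refl _) line hm h2
  rw [this]

theorem pv_B_nlheader {c h nl : List Char} (hh : '\n' ∈ h) : pvB c h nl = c := by
  unfold pvB
  rw [if_pos]
  rw [PySem.Chars.isIn_iff_infix]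
  obtain ⟨s, t, rfl⟩ := List.append_of_mem hh
  exact ⟨s, t, by simp⟩

theorem pv_total (c h nl : List Char) : pvA c h nl = pvB c h nl := by
  by_cases hh : '\n' ∈ h
  · rw [pv_A_nlheader hh, pv_B_nlheader hh]
  · exact pv_main_nonl h nl hh c.length c (le_refl _)

-- ===== VERDICT (by name: the statement is the Claim_ definition above) =====
theorem insert_after_header_spec : Claim_equal_insert_after_header := by
  intro content header new_lines_text _
  unfold Spec_insert_after_header insert_after_header insert_after_header_alt
  exact congrArg String.ofList (pv_total _ _ _)
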